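-- pv_equiv track=rewrite | github.com/bstriner/inference_rules | inference_rules/walker.py | entities_ending_on
-- ===== SOURCE A (Python) =====
-- def walk(tm, depth, s, steps):
--     # generate walks from s
--     if depth > 0:
--         for trip in tm.get(s, []):
--             for w in walk(tm, depth - 1, trip[2], steps + [trip]):
--                 yield w
--     else:
--         yield steps
--
-- def entities_ending_on(tm, depth, s, t):
--     ents = set()
--     for w in walk(tm, depth, s, steps=[]):
--         if w[-1][2] == t:
--             for step in w:
--                 ents.add(step[0])
--                 ents.add(step[2])
--     return ents
-- ===== SOURCE B (Python) =====
-- def entities_ending_on(tm, depth, s, t):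
--     # iterative level-by-level expansion of (endpoint, walk) frontiers instead of a recursive generator
--     frontier = [(s, [])]
--     d = depth
--     while d > 0 and frontier:
--         frontier = [(trip[2], w + [trip])
--                     for node, w in frontier
--                     for trip in tm.get(node, [])]
--         d -= 1
--     ents = set()
--     for node, w in frontier:
--         if node == t:
--             for step in w:
--                 ents.add(step[0])
--                 ents.add(step[2])
--     return ents
-- ===== Notes on version B (the rewrite author's own statement) =====
-- stated objective: alternative
-- what changed: A's recursive generator DFS over all walks is replaced by an iterative level-by-level expansion of (endpoint, walk) frontiers with the end test done on the tracked endpoint; no recursion and no generators.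
import Mathlib
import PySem

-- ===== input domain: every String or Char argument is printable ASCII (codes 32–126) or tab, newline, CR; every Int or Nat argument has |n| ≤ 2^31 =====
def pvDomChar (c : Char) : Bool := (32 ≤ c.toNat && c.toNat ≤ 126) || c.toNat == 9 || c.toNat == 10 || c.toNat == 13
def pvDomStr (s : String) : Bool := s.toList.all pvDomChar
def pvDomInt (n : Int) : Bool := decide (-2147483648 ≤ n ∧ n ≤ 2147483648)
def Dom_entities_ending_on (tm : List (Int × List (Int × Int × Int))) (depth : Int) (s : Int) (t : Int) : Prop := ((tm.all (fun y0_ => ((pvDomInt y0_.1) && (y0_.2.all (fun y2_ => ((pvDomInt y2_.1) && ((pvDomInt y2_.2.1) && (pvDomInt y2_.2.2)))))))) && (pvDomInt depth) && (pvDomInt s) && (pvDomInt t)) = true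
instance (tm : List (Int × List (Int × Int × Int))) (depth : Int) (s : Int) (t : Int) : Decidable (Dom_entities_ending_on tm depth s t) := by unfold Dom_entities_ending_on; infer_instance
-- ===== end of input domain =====

-- B replaces A's recursive generator DFS over walks by an iterative level-by-level frontier
-- expansion of (endpoint, walk) pairs; same cost, no recursion (on depth <= 0 A raises IndexError, B returns the empty set).


-- ===== PORT A =====
-- tm.get(node, []) : association-list lookup, first match (Python dict keys are unique)
def tmGet (tm : List (Int × List (Int × Int × Int))) (node : Int) : List (Int × Int × Int) :=
  (List.lookup node tm).getD []

-- the generator 'walk', materialised in its yield order; the Int depth counter is run as the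
-- Nat fuel depth.toNat (fuel = 0 ⟺ depth ≤ 0, exactly A's 'if depth > 0' test)
def walkA (tm : List (Int × List (Int × Int × Int))) : Nat → Int → List (Int × Int × Int) → List (List (Int × Int × Int))
  | Nat.succ k, s, steps => (tmGet tm s).flatMap (fun trip => walkA tm k trip.2.2 (steps ++ [trip]))
  | 0, _, steps => [steps]

def entities_ending_on (tm : List (Int × List (Int × Int × Int))) (depth : Int) (s : Int) (t : Int) : List Int :=
  (walkA tm depth.toNat s []).foldl
    (fun ents w =>
      -- w[-1][2] == t ; w is nonempty on every admitted input (depth ≥ 1), see Pre_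
      if ((PySem.List.pyGet? w (-1)).getD (0, 0, 0)).2.2 == t then
        w.foldl (fun e step => PySem.Set.add (PySem.Set.add e step.1) step.2.2) ents
      else ents)
    PySem.Set.empty

-- ===== PORT B =====
def stepFrontier (tm : List (Int × List (Int × Int × Int)))
    (fr : List (Int × List (Int × Int × Int))) : List (Int × List (Int × Int × Int)) :=
  fr.flatMap (fun p => (tmGet tm p.1).map (fun trip => (trip.2.2, p.2 ++ [trip])))

-- 'while d > 0 and frontier: … ; d -= 1' runs at most depth.toNat times
def frontierLoop (tm : List (Int × List (Int × Int × Int))) :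
    Nat → List (Int × List (Int × Int × Int)) → List (Int × List (Int × Int × Int))
  | Nat.succ k, fr => if fr.isEmpty then fr else frontierLoop tm k (stepFrontier tm fr)
  | 0, fr => fr

def entities_ending_on_alt (tm : List (Int × List (Int × Int × Int))) (depth : Int) (s : Int) (t : Int) : List Int :=
  (frontierLoop tm depth.toNat [(s, [])]).foldl
    (fun ents p =>
      if p.1 == t then
        p.2.foldl (fun e step => PySem.Set.add (PySem.Set.add e step.1) step.2.2) ents
      else ents)
    PySem.Set.empty

-- ===== PRECONDITION & SPEC =====
-- depth ≤ 0 makes A evaluate w[-1] on the empty walk and raise IndexError; those inputs are excluded.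
def Pre_entities_ending_on (tm : List (Int × List (Int × Int × Int))) (depth : Int) (s : Int) (t : Int) : Prop :=
  1 ≤ depth
instance (tm : List (Int × List (Int × Int × Int))) (depth : Int) (s : Int) (t : Int) : Decidable (Pre_entities_ending_on tm depth s t) := by unfold Pre_entities_ending_on; infer_instance

def pvWitness_entities_ending_on : (List (Int × List (Int × Int × Int))) × Int × Int × Int :=
  ([(0, [(0, 0, 1)])], 1, 0, 1)

def Spec_entities_ending_on (tm : List (Int × List (Int × Int × Int))) (depth : Int) (s : Int) (t : Int) (out : List Int) : Prop := out = entities_ending_on_alt tm depth s t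
instance (tm : List (Int × List (Int × Int × Int))) (depth : Int) (s : Int) (t : Int) (out : List Int) : Decidable (Spec_entities_ending_on tm depth s t out) := by unfold Spec_entities_ending_on; infer_instance

-- ===== CLAIM (what is proved, stated in full; the proofs are below) =====
def Claim_equal_entities_ending_on : Prop := ∀ (tm : List (Int × List (Int × Int × Int))) (depth : Int) (s : Int) (t : Int), Dom_entities_ending_on tm depth s t → Pre_entities_ending_on tm depth s t → Spec_entities_ending_on tm depth s t (entities_ending_on tm depth s t)

-- ===== LEMMAS AND PROOFS =====

-- endpoint of a walk that started at n
def endOf (n : Int) : List (Int × Int × Int) → Int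
  | [] => n
  | trip :: w => endOf trip.2.2 w

theorem endOf_eq_getLast (n : Int) (w : List (Int × Int × Int)) (hw : w ≠ []) (z : Int × Int × Int) :
    endOf n w = (w.getLast?.getD z).2.2 := by
  induction w generalizing n with
  | nil => exact absurd rfl hw
  | cons a l ih =>
    cases l with
    | nil => rfl
    | cons b m => rw [List.getLast?_cons_cons]; exact ih a.2.2 (by simp)

-- walkA with accumulator 'steps' is walkA from [] with 'steps' prepended to every walk
theorem walkA_shift (tm : List (Int × List (Int × Int × Int))) (k : Nat) :
    ∀ (n : Int) (steps : List (Int × Int × Int)),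
      walkA tm k n steps = (walkA tm k n []).map (steps ++ ·) := by
  induction k with
  | zero => intro n steps; simp [walkA]
  | succ k ih =>
    intro n steps
    simp only [walkA, List.map_flatMap]
    refine List.flatMap_congr ?_
    intro trip _
    rw [ih trip.2.2 (steps ++ [trip]), ih trip.2.2 ([] ++ [trip])]
    simp [List.map_map, Function.comp_def]

-- the frontier after k expansion steps: every frontier pair extended by every length-k walk
theorem frontierLoop_eq (tm : List (Int × List (Int × Int × Int))) (k : Nat) :
    ∀ (fr : List (Int × List (Int × Int × Int))),
      frontierLoop tm k fr
        = fr.flatMap (fun p => (walkA tm k p.1 []).map (fun suf => (endOf p.1 suf, p.2 ++ suf))) := by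
  induction k with
  | zero => intro fr; simp [frontierLoop, walkA, endOf]
  | succ k ih =>
    intro fr
    rcases fr with _ | ⟨q, fr⟩
    · simp [frontierLoop]
    rw [show frontierLoop tm (Nat.succ k) (q :: fr)
          = frontierLoop tm k (stepFrontier tm (q :: fr)) from rfl,
        ih, stepFrontier, List.flatMap_assoc]
    refine List.flatMap_congr ?_
    intro p _
    simp only [walkA, List.map_flatMap, List.flatMap_map]
    refine List.flatMap_congr ?_
    intro trip _
    rw [walkA_shift tm k trip.2.2 ([] ++ [trip])]
    simp [List.map_map, Function.comp_def, endOf]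

-- every walk yielded at positive fuel is nonempty
theorem walkA_ne_nil (tm : List (Int × List (Int × Int × Int))) (k : Nat)
    (n : Int) (w : List (Int × Int × Int)) (hw : w ∈ walkA tm (Nat.succ k) n []) : w ≠ [] := by
  simp only [walkA, List.mem_flatMap] at hw
  obtain ⟨trip, _, hw⟩ := hw
  rw [walkA_shift tm k trip.2.2 ([] ++ [trip])] at hw
  simp only [List.mem_map] at hw
  obtain ⟨suf, _, rfl⟩ := hw
  simp

theorem pyGet_neg_one_getLast {α : Type} (w : List α) (hw : w ≠ []) :
    PySem.List.pyGet? w (-1) = w.getLast? := by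
  have hl : 0 < w.length := List.length_pos_iff.mpr hw
  unfold PySem.List.pyGet? PySem.List.pyIdx?
  rw [if_neg (by omega), if_pos (by omega : -(w.length : Int) ≤ -1), List.getLast?_eq_getElem?]
  simp

-- ===== VERDICT (by name: the statement is the Claim_ definition above) =====
theorem entities_ending_on_spec : Claim_equal_entities_ending_on := by
  intro tm depth s t _ hpre
  unfold Spec_entities_ending_on entities_ending_on entities_ending_on_alt
  rw [frontierLoop_eq tm depth.toNat]
  simp only [List.flatMap_cons, List.flatMap_nil, List.append_nil, List.nil_append,
    List.foldl_map]
  refine PySem.List.foldl_congr_mem _ _ _ _ ?_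
  intro ents w hw
  obtain ⟨k, hk⟩ : ∃ k, depth.toNat = Nat.succ k :=
    ⟨depth.toNat - 1, by unfold Pre_entities_ending_on at hpre; omega⟩
  rw [hk] at hw
  have hne : w ≠ [] := walkA_ne_nil tm k s w hw
  rw [endOf_eq_getLast s w hne (0, 0, 0), pyGet_neg_one_getLast w hne]
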